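-- pv_equiv track=rewrite | github.com/A163r70/Curso-Python-POO | Codewars_3/Connect_Four-placing_tokens_6_kyu.py | connect_four_place
-- ===== SOURCE A (Python) =====
-- def connect_four_place(columns):
--     tablero = []
--     for i in range(6):
--         fila = []
--         for j in range(7):
--             fila.append('-')
--         tablero.append(fila)
--
--     usuario = 'Y'
--
--     for move in columns:
--         col = move
--         for fila in range(5, -1, -1):
--             if tablero[fila][col] == '-':
--                 tablero[fila][col] = usuario
--                 break
--
--         if usuario == 'Y':
--             usuario = 'R'
--         else:
--             usuario = 'Y'
--
--     return tablero
-- ===== SOURCE B (Python) =====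
-- def connect_four_place(columns):
--     board = [['-'] * 7 for _ in range(6)]
--     heights = [0] * 7
--     player = 'Y'
--     for col in columns:
--         h = heights[col]
--         if h < 6:
--             board[5 - h][col] = player
--             heights[col] += 1
--         player = 'R' if player == 'Y' else 'Y'
--     return board
-- ===== Notes on version B (the rewrite author's own statement) =====
-- stated objective: simpler
-- what changed: Replaces A's bottom-up scan of each column for the first empty cell with a heights counter per column, so each move places directly at row 5-heights[col] without scanning the board.
import Mathlib
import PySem

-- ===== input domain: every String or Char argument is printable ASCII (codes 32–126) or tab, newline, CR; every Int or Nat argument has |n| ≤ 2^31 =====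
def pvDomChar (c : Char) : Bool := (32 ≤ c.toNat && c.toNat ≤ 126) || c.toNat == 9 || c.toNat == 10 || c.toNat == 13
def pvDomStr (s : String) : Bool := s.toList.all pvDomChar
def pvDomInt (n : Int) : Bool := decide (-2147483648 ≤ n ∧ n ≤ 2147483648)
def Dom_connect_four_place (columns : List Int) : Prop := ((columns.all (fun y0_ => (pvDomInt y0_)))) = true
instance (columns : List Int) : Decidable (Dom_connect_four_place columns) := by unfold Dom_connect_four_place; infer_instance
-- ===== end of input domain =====

-- B replaces A's per-move bottom-up column scan with a per-column heights counter (simpler; same cost class).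

-- ===== PORT A =====
-- inner loop 'for fila in range(5, -1, -1): if tablero[fila][col] == '-': place; break'
def cfpScanGo (filas : List Int) (tab : List (List String)) (col : Int) (usuario : String) :
    List (List String) :=
  match filas with
  | [] => tab
  | fila :: rest =>
    match PySem.List.pyGet? tab fila with
    | none => tab   -- IndexError (unreachable: fila ∈ 0..5)
    | some row =>
      match PySem.List.pyGet? row col with
      | none => tab -- IndexError (excluded by Pre_)
      | some cell =>
        if cell = "-" then
          PySem.List.pySetD tab fila (PySem.List.pySetD row col usuario)
        else cfpScanGo rest tab col usuario

def connect_four_place (columns : List Int) : List (List String) :=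
  (columns.foldl (fun (st : List (List String) × String) move =>
      (cfpScanGo (PySem.List.pyRange 5 (-1) (-1)) st.1 move st.2,
       if st.2 = "Y" then "R" else "Y"))
    ((PySem.List.pyRange 0 6 1).foldl
      (fun tab _ => tab ++ [(PySem.List.pyRange 0 7 1).foldl (fun fila _ => fila ++ ["-"]) []]) [],
     "Y")).1

-- ===== PORT B =====
def cfpLoopB (moves : List Int) (board : List (List String)) (heights : List Int)
    (player : String) : List (List String) :=
  match moves with
  | [] => board
  | col :: rest =>
    match PySem.List.pyGet? heights col with
    | none => board -- IndexError (excluded by Pre_)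
    | some h =>
      if h < 6 then
        cfpLoopB rest
          (PySem.List.pySetD board (5 - h)
            (PySem.List.pySetD (PySem.List.pyGetD board (5 - h) []) col player))
          (PySem.List.pySetD heights col (h + 1))
          (if player = "Y" then "R" else "Y")
      else
        cfpLoopB rest board heights (if player = "Y" then "R" else "Y")

def connect_four_place_alt (columns : List Int) : List (List String) :=
  cfpLoopB columns (List.replicate 6 (List.replicate 7 "-")) (List.replicate 7 (0 : Int)) "Y"

-- ===== PRECONDITION & SPEC =====
-- Pre_ excludes column indices outside -7..6, on which A raises IndexError (B raises there too).
def Pre_connect_four_place (columns : List Int) : Prop :=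
  ∀ c ∈ columns, -7 ≤ c ∧ c < 7

instance (columns : List Int) : Decidable (Pre_connect_four_place columns) := by
  unfold Pre_connect_four_place; infer_instance

def pvWitness_connect_four_place : List Int := [0, 3, 0, -1, 6, 3, 3]

def Spec_connect_four_place (columns : List Int) (out : List (List String)) : Prop :=
  out = connect_four_place_alt columns
instance (columns : List Int) (out : List (List String)) : Decidable (Spec_connect_four_place columns out) := by unfold Spec_connect_four_place; infer_instance

-- ===== CLAIM (what is proved, stated in full; the proofs are below) =====
def Claim_equal_connect_four_place : Prop := ∀ (columns : List Int), Dom_connect_four_place columns → Pre_connect_four_place columns → Spec_connect_four_place columns (connect_four_place columns)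

-- ===== LEMMAS AND PROOFS =====

def cfpIdx (col : Int) : Nat := (if col < 0 then col + 7 else col).toNat

def cfpInv (board : List (List String)) (heights : List Int) : Prop :=
  board.length = 6 ∧ heights.length = 7 ∧
  (∀ r : Nat, r < 6 → (board.getD r []).length = 7) ∧
  (∀ c : Nat, c < 7 → 0 ≤ heights.getD c 0 ∧ heights.getD c 0 ≤ 6 ∧
    ∀ r : Nat, r < 6 → ((board.getD r []).getD c "" = "-" ↔ (r : Int) < 6 - heights.getD c 0))

theorem cfpIdx?_eq (len : Nat) (col : Int) (hl : len = 7) (h1 : -7 ≤ col) (h2 : col < 7) :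
    PySem.List.pyIdx? len col = some (cfpIdx col) := by
  subst hl
  simp only [PySem.List.pyIdx?, cfpIdx]
  split_ifs with a b c <;> simp_all <;> omega

theorem cfpIdx_lt (col : Int) (h1 : -7 ≤ col) (h2 : col < 7) : cfpIdx col < 7 := by
  unfold cfpIdx; split_ifs <;> omega

theorem cfpGet7 {α : Type} (xs : List α) (col : Int) (d : α) (hl : xs.length = 7)
    (h1 : -7 ≤ col) (h2 : col < 7) :
    PySem.List.pyGet? xs col = some (xs.getD (cfpIdx col) d) := by
  simp only [PySem.List.pyGet?, cfpIdx?_eq xs.length col hl h1 h2, Option.bind_some,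
    List.getD_eq_getElem?_getD]
  rw [List.getElem?_eq_getElem (by have := cfpIdx_lt col h1 h2; omega)]
  rfl

theorem cfpSet7 {α : Type} (xs : List α) (col : Int) (v : α) (hl : xs.length = 7)
    (h1 : -7 ≤ col) (h2 : col < 7) :
    PySem.List.pySetD xs col v = xs.set (cfpIdx col) v := by
  simp only [PySem.List.pySetD, PySem.List.pySet?, cfpIdx?_eq xs.length col hl h1 h2,
    Option.map_some, Option.getD_some]

theorem cfpGetRow (tab : List (List String)) (k : Nat) (hk : (k : Int) < tab.length) :
    PySem.List.pyGet? tab (k : Int) = some (tab.getD k []) := by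
  have hk' : k < tab.length := by omega
  rw [PySem.List.pyGet?_of_nonneg tab (by omega)]
  simp [List.getD_eq_getElem?_getD, List.getElem?_eq_getElem hk']

def cfpDesc : Nat → List Int
  | 0 => []
  | k + 1 => (k : Int) :: cfpDesc k

theorem cfpDesc6 : PySem.List.pyRange 5 (-1) (-1) = cfpDesc 6 := by decide

-- what A's scan does, under the invariant, expressed with B's height

theorem cfpScan_eq (board : List (List String)) (heights : List Int) (col : Int)
    (player : String) (hInv : cfpInv board heights) (h1 : -7 ≤ col) (h2 : col < 7) :
    ∀ k : Nat, 6 - (heights.getD (cfpIdx col) 0).toNat ≤ k → k ≤ 6 →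
    cfpScanGo (cfpDesc k) board col player =
      (if heights.getD (cfpIdx col) 0 < 6 then
        board.set (5 - (heights.getD (cfpIdx col) 0).toNat)
          ((board.getD (5 - (heights.getD (cfpIdx col) 0).toNat) []).set (cfpIdx col) player)
      else board) := by
  obtain ⟨hb6, hh7, hrow, hcell⟩ := hInv
  set n := cfpIdx col with hn
  have hn7 : n < 7 := cfpIdx_lt col h1 h2
  obtain ⟨h0, h6, hiff⟩ := hcell n hn7
  set h : Int := heights.getD n 0 with hh
  intro k
  induction k with
  | zero =>
    intro hk1 _
    have : h = 6 := by omega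
    simp [cfpScanGo, cfpDesc, this]
  | succ k ih =>
    intro hk1 hk2
    have hkb : (k : Int) < board.length := by omega
    have hrk : (board.getD k []).length = 7 := hrow k (by omega)
    simp only [cfpDesc, cfpScanGo, cfpGetRow board k hkb,
      cfpGet7 (board.getD k []) col "" hrk h1 h2, ← hn]
    by_cases hc : k < 6 - h.toNat
    · -- target row: cell is '-', place here; k = 5 - h.toNat
      have hlt : (k : Int) < 6 - h := by omega
      have hfill : h < 6 := by omega
      rw [if_pos ((hiff k (by omega)).mpr hlt)]
      have hk5 : k = 5 - h.toNat := by omega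
      rw [if_pos hfill, cfpSet7 (board.getD k []) col player hrk h1 h2,
        PySem.List.pySetD_of_nonneg board _ (by omega)]
      simp [hk5, ← hn]
    · -- filled row: cell is not '-', continue scanning
      have hge : ¬ ((k : Int) < 6 - h) := by omega
      rw [if_neg (by rw [hiff k (by omega)]; exact hge)]
      exact ih (by omega) (by omega)

theorem cfpGetD_set {α : Type} (xs : List α) (i j : Nat) (v d : α) :
    (xs.set i v).getD j d = if i = j ∧ i < xs.length then v else xs.getD j d := by
  simp only [List.getD_eq_getElem?_getD, List.getElem?_set]
  split_ifs <;> simp_all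
  omega

theorem cfpInv_step (board : List (List String)) (heights : List Int) (n : Nat)
    (player : String) (hInv : cfpInv board heights) (hn7 : n < 7) (hp : player ≠ "-")
    (hfill : heights.getD n 0 < 6) :
    cfpInv
      (board.set (5 - (heights.getD n 0).toNat)
        ((board.getD (5 - (heights.getD n 0).toNat) []).set n player))
      (heights.set n (heights.getD n 0 + 1)) := by
  obtain ⟨hb6, hh7, hrow, hcell⟩ := hInv
  obtain ⟨h0, h6, hiff⟩ := hcell n hn7
  set h : Int := heights.getD n 0 with hh
  set r0 : Nat := 5 - h.toNat with hr0
  have hr06 : r0 < 6 := by omega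
  have hrowlen : ∀ r : Nat, r < 6 →
      ((board.set r0 ((board.getD r0 []).set n player)).getD r []) =
        if r = r0 then (board.getD r0 []).set n player else board.getD r [] := by
    intro r hr
    rw [cfpGetD_set]
    by_cases e : r = r0
    · rw [if_pos ⟨e.symm, by omega⟩, if_pos e]
    · rw [if_neg (by rintro ⟨rfl, -⟩; exact e rfl), if_neg e]
  refine ⟨by simp [hb6], by simp [hh7], ?_, ?_⟩
  · intro r hr
    rw [hrowlen r hr]
    split_ifs with e
    · simp [List.length_set]; exact hrow r0 hr06
    · exact hrow r hr
  · intro c hc7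
    have hhts : (heights.set n (h + 1)).getD c 0 =
        if n = c then h + 1 else heights.getD c 0 := by
      rw [cfpGetD_set]
      split_ifs <;> simp_all
    obtain ⟨hc0, hc6, hciff⟩ := hcell c hc7
    by_cases e : n = c
    · subst e
      rw [hhts, if_pos rfl]
      refine ⟨by omega, by omega, ?_⟩
      intro r hr
      rw [hrowlen r hr]
      split_ifs with er
      · rw [cfpGetD_set, if_pos ⟨rfl, by rw [hrow r0 hr06]; omega⟩]
        constructor
        · intro hpe; exact absurd hpe hp
        · intro hlt; exfalso; omega
      · rw [hciff r hr, ← hh]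
        have : (r : Int) ≠ 5 - h := by
          intro e2; apply er; rw [hr0]; omega
        omega
    · rw [hhts, if_neg e]
      refine ⟨hc0, hc6, ?_⟩
      intro r hr
      rw [hrowlen r hr]
      split_ifs with er
      · rw [cfpGetD_set, if_neg (by rintro ⟨rfl, -⟩; exact e rfl), ← er]
        exact hciff r hr
      · exact hciff r hr

theorem cfpLoop_eq : ∀ (cols : List Int) (board : List (List String)) (heights : List Int)
    (player : String), cfpInv board heights → (∀ c ∈ cols, -7 ≤ c ∧ c < 7) →
    (player = "Y" ∨ player = "R") →
    (cols.foldl (fun (st : List (List String) × String) move =>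
        (cfpScanGo (PySem.List.pyRange 5 (-1) (-1)) st.1 move st.2,
         if st.2 = "Y" then "R" else "Y")) (board, player)).1
      = cfpLoopB cols board heights player := by
  intro cols
  induction cols with
  | nil => intro board heights player _ _ _; rfl
  | cons col rest ih =>
    intro board heights player hInv hcols hp
    obtain ⟨hc1, hc2⟩ := hcols col (List.mem_cons_self)
    have hh7 : heights.length = 7 := hInv.2.1
    have hb6 : board.length = 6 := hInv.1
    set n := cfpIdx col with hn
    have hn7 : n < 7 := cfpIdx_lt col hc1 hc2
    obtain ⟨h0, h6, -⟩ := hInv.2.2.2 n hn7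
    set h : Int := heights.getD n 0 with hh
    have hget : PySem.List.pyGet? heights col = some h := cfpGet7 heights col 0 hh7 hc1 hc2
    have hscan := cfpScan_eq board heights col player hInv hc1 hc2 6 (by omega) le_rfl
    rw [← hn, ← hh] at hscan
    have hp' : (if player = "Y" then "R" else "Y") = "Y" ∨
        (if player = "Y" then "R" else "Y") = "R" := by
      rcases hp with e | e <;> rw [e] <;> simp
    have hpm : player ≠ "-" := by rcases hp with e | e <;> rw [e] <;> decide
    simp only [List.foldl_cons, cfpLoopB, hget, cfpDesc6, hscan]
    by_cases hfill : h < 6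
    · rw [if_pos hfill, if_pos hfill]
      have e1 : PySem.List.pySetD board (5 - h)
          (PySem.List.pySetD (PySem.List.pyGetD board (5 - h) []) col player)
          = board.set (5 - h.toNat)
              ((board.getD (5 - h.toNat) []).set n player) := by
        rw [PySem.List.pySetD_of_nonneg board _ (by omega),
          PySem.List.pyGetD_eq_getElem board [] (by omega) (by omega),
          cfpSet7 _ col player (by
            rw [show board[(5 - h).toNat] = board.getD (5 - h).toNat [] from
              (List.getD_eq_getElem board [] (by omega)).symm]
            exact hInv.2.2.1 (5 - h).toNat (by omega)) hc1 hc2,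
          ← hn,
          show board[(5 - h).toNat] = board.getD (5 - h).toNat [] from
            (List.getD_eq_getElem board [] (by omega)).symm,
          show ((5 - h).toNat : Nat) = 5 - h.toNat from by omega]
      have e3 : PySem.List.pySetD heights col (h + 1) = heights.set n (h + 1) := by
        rw [cfpSet7 heights col (h + 1) hh7 hc1 hc2, ← hn]
      rw [e1, e3]
      exact ih _ _ _ (by rw [hh]; exact cfpInv_step board heights n player hInv hn7 hpm (by omega))
        (fun c hc => hcols c (List.mem_cons_of_mem _ hc)) hp'
    · rw [if_neg hfill, if_neg hfill]
      exact ih _ _ _ hInv (fun c hc => hcols c (List.mem_cons_of_mem _ hc)) hp'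

theorem cfpInit :
    (PySem.List.pyRange 0 6 1).foldl
      (fun tab _ => tab ++ [(PySem.List.pyRange 0 7 1).foldl (fun fila _ => fila ++ ["-"]) []]) []
      = List.replicate 6 (List.replicate 7 "-") := by decide

theorem cfpInvInit :
    cfpInv (List.replicate 6 (List.replicate 7 "-")) (List.replicate 7 (0 : Int)) := by
  unfold cfpInv; decide

-- ===== VERDICT (by name: the statement is the Claim_ definition above) =====
theorem connect_four_place_spec : Claim_equal_connect_four_place := by
  intro columns _ hpre
  unfold Spec_connect_four_place connect_four_place connect_four_place_alt
  rw [cfpInit]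
  exact cfpLoop_eq columns _ _ "Y" cfpInvInit hpre (Or.inl rfl)
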